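-- pv_equiv track=rewrite | github.com/AdityaRaut13/text_based_emotion_clf | preprocessing.py | labelWord
-- ===== SOURCE A (Python) =====
-- def labelWord(lines):
--     sample_set = dict()
--     count = 0
--     for line in lines:
--         for word in line:
--             if word not in sample_set:
--                 sample_set[word] = count
--                 count += 1
--     return sample_set
-- ===== SOURCE B (Python) =====
-- def labelWord(lines):
--     # Build the first-occurrence position map by inserting positions back to
--     # front (earlier positions overwrite later ones), then sort the distinct
--     # words by that position and number them 0,1,2,...
--     flat = [w for line in lines for w in line]
--     first = {w: i for i, w in reversed(list(enumerate(flat)))}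
--     return {w: i for i, w in enumerate(sorted(first, key=first.get))}
-- ===== Notes on version B (the rewrite author's own statement) =====
-- stated objective: alternative
-- what changed: Replaces A's single novelty-detecting pass (dict membership test + running counter) by a staged pipeline: build a first-occurrence position map by inserting enumerated positions back to front, sort the distinct words by that position, then enumerate the sorted list.
import Mathlib
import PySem

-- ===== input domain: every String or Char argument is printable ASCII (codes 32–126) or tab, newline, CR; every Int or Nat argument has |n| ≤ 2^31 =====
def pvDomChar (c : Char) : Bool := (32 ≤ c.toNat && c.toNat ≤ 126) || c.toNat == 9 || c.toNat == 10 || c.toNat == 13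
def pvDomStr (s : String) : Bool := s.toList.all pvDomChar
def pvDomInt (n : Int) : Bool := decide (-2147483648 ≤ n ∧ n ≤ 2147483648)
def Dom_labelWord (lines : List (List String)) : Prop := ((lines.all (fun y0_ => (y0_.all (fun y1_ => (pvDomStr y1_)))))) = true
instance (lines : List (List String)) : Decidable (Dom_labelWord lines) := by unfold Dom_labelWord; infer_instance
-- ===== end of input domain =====

-- B replaces A's single novelty-detecting pass (dict + counter) by a set/sort pipeline:
-- sort the distinct words by first-occurrence position, then enumerate; an alternative of similar size.

-- ===== PORT A =====
def labelWord (lines : List (List String)) : List (String × Int) :=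
  (lines.foldl
    (fun (st : PySem.Dict String Int × Int) line =>
      line.foldl
        (fun st word =>
          if st.1.contains word then st else (st.1.insert word st.2, st.2 + 1))
        st)
    (PySem.Dict.empty, 0)).1.items

-- ===== PORT B =====
-- first.get w is total here (sorted iterates first's own keys), so the Option
-- from Dict.get? is eliminated with getD 0 — exact on all reached inputs.
def labelWord_alt (lines : List (List String)) : List (String × Int) :=
  let flat := lines.flatten
  let first : PySem.Dict String Int :=
    ((PySem.List.enumerate flat).reverse).foldl (fun d p => d.insert p.2 p.1) PySem.Dict.empty
  let ordered := PySem.List.sorted first.keys (fun w => (first.get? w).getD 0) false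
  (PySem.List.enumerate ordered).map (fun p => (p.2, p.1))

-- ===== PRECONDITION & SPEC =====
def Spec_labelWord (lines : List (List String)) (out : List (String × Int)) : Prop := out = labelWord_alt lines
instance (lines : List (List String)) (out : List (String × Int)) : Decidable (Spec_labelWord lines out) := by unfold Spec_labelWord; infer_instance

-- ===== CLAIM (what is proved, stated in full; the proofs are below) =====
def Claim_equal_labelWord : Prop := ∀ (lines : List (List String)), Dom_labelWord lines → Spec_labelWord lines (labelWord lines)

-- ===== LEMMAS AND PROOFS =====

-- the dict A builds: word ↦ its index among the distinct words u
def pvD (u : List String) : PySem.Dict String Int :=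
  PySem.Dict.mk ((PySem.List.enumerate u).map (fun p => (p.2, p.1)))

theorem pvD_keys (u : List String) : (pvD u).keys = u := by
  simp [pvD, PySem.Dict.keys, List.map_map, Function.comp_def]

theorem pvD_contains (u : List String) (w : String) : (pvD u).contains w = u.contains w := by
  have := PySem.Dict.contains_iff_mem_keys (d := pvD u) (k := w)
  rw [pvD_keys] at this
  by_cases h : w ∈ u
  · simp [this.mpr h, h]
  · simp [h]
    rw [Bool.eq_false_iff]
    intro hc
    exact h (this.mp hc)

theorem pvD_snoc (u : List String) (w : String) (hw : w ∉ u) :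
    (pvD u).insert w (u.length : Int) = pvD (u ++ [w]) := by
  apply PySem.Dict.ext
  rw [PySem.Dict.items_insert_of_not_contains]
  · simp [pvD, PySem.List.enumerate_append, PySem.List.enumerate]
  · rw [pvD_contains]
    simp [hw]

-- the inner-word step of A, named for the invariant lemma
def pvStep (st : PySem.Dict String Int × Int) (word : String) : PySem.Dict String Int × Int :=
  if st.1.contains word then st else (st.1.insert word st.2, st.2 + 1)

theorem pvInv (ws : List String) (u : List String) :
    ws.foldl pvStep (pvD u, (u.length : Int)) =
      (pvD (ws.foldl PySem.Set.add u), ((ws.foldl PySem.Set.add u).length : Int)) := by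
  induction ws generalizing u with
  | nil => simp
  | cons w ws ih =>
    simp only [List.foldl_cons]
    by_cases h : w ∈ u
    · have : pvStep (pvD u, (u.length : Int)) w = (pvD u, (u.length : Int)) := by
        simp [pvStep, pvD_contains, h]
      rw [this, ih]
      simp [PySem.Set.add, h]
    · have : pvStep (pvD u, (u.length : Int)) w = (pvD (u ++ [w]), ((u ++ [w]).length : Int)) := by
        simp [pvStep, pvD_contains, h, pvD_snoc u w h]
      rw [this, ih]
      simp [PySem.Set.add, h]

-- the distinct words in first-occurrence order have strictly increasing first indices
theorem pvOfList_pairwise_index (xs : List String) :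
    (PySem.Set.ofList xs).Pairwise
      (fun a b => (PySem.List.index? xs a).getD 0 < (PySem.List.index? xs b).getD 0) := by
  induction xs using List.reverseRecOn with
  | nil => simp [PySem.Set.ofList]
  | append_singleton l x ih =>
    rw [PySem.Set.ofList_append_singleton]
    by_cases hx : x ∈ l
    · rw [PySem.Set.add_of_mem (by simpa [PySem.Set.mem_ofList] using hx)]
      refine ih.imp_of_mem ?_
      intro a b ha hb h
      rw [PySem.List.index?_append_of_mem _ (by simpa [PySem.Set.mem_ofList] using ha),
          PySem.List.index?_append_of_mem _ (by simpa [PySem.Set.mem_ofList] using hb)]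
      exact h
    · rw [PySem.Set.add_of_not_mem (by simpa [PySem.Set.mem_ofList] using hx)]
      rw [List.pairwise_append]
      refine ⟨?_, List.pairwise_singleton _ _, ?_⟩
      · refine ih.imp_of_mem ?_
        intro a b ha hb h
        rw [PySem.List.index?_append_of_mem _ (by simpa [PySem.Set.mem_ofList] using ha),
            PySem.List.index?_append_of_mem _ (by simpa [PySem.Set.mem_ofList] using hb)]
        exact h
      · intro a ha b hb
        rw [List.mem_singleton] at hb; subst hb
        have haL : a ∈ l := by simpa [PySem.Set.mem_ofList] using ha
        rw [PySem.List.index?_append_of_mem _ haL,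
            PySem.List.index?_append_singleton_self l _ hx]
        obtain ⟨k, hk⟩ := (PySem.List.index?_isSome_iff (xs := l) (v := a)).mpr haL |> Option.isSome_iff_exists.mp
        obtain ⟨hklt, -, -⟩ := PySem.List.getElem_of_index?_eq_some hk
        rw [hk]
        simpa using hklt

-- the first-occurrence dict built back to front: get? w = first index of w
def pvFirst (xs : List String) : PySem.Dict String Int :=
  ((PySem.List.enumerate xs 0).reverse).foldl (fun d p => d.insert p.2 p.1) PySem.Dict.empty

theorem pvGetFold (xs : List String) (s : Int) (d : PySem.Dict String Int) (w : String) :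
    (((PySem.List.enumerate xs s).reverse).foldl (fun d p => d.insert p.2 p.1) d).get? w =
      (match PySem.List.index? xs w with
       | some k => some (s + k)
       | none => d.get? w) := by
  induction xs generalizing s d with
  | nil => simp [PySem.List.enumerate, PySem.List.index?]
  | cons x xs ih =>
    rw [PySem.List.enumerate_cons]
    simp only [List.reverse_cons, List.foldl_append, List.foldl_cons, List.foldl_nil]
    by_cases h : w = x
    · subst h
      rw [PySem.Dict.get?_insert_self, PySem.List.index?_cons_self]
      simp
    · rw [PySem.Dict.get?_insert_of_ne _ _ h, ih,
        PySem.List.index?_cons_of_ne xs (Ne.symm h)]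
      cases hix : PySem.List.index? xs w with
      | none => simp
      | some k =>
        simp only [Option.map_some]
        congr 1
        push_cast
        ring

theorem pvGetFirst (xs : List String) (w : String) (k : Nat)
    (hk : PySem.List.index? xs w = some k) :
    (pvFirst xs).get? w = some (k : Int) := by
  rw [pvFirst, pvGetFold, hk]
  simp

theorem pvKeysFirst (xs : List String) :
    (pvFirst xs).keys = PySem.Set.ofList xs.reverse := by
  rw [pvFirst, PySem.Dict.keys_foldl_insert_key]
  rw [PySem.Dict.keys_empty, PySem.Set.update_nil_left]
  congr 1
  rw [List.map_reverse, PySem.List.map_snd_enumerate]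

-- sorting first's keys by first index recovers dedup xs
theorem pvSorted_eq_dedup (xs : List String) :
    PySem.List.sorted (pvFirst xs).keys
      (fun w => ((pvFirst xs).get? w).getD 0) false = PySem.List.dedup xs := by
  apply PySem.List.sorted_eq_of_perm_of_pairwise_lt
  · rw [pvKeysFirst, PySem.List.dedup_eq_ofList]
    refine (List.perm_ext_iff_of_nodup (PySem.Set.nodup_ofList _) (PySem.Set.nodup_ofList _)).mpr ?_
    intro a
    simp [PySem.Set.mem_ofList]
  · rw [PySem.List.dedup_eq_ofList]
    refine (pvOfList_pairwise_index xs).imp_of_mem ?_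
    intro a b ha hb h
    have haX : a ∈ xs := by simpa [PySem.Set.mem_ofList] using ha
    have hbX : b ∈ xs := by simpa [PySem.Set.mem_ofList] using hb
    obtain ⟨ka, hka⟩ := Option.isSome_iff_exists.mp
      ((PySem.List.index?_isSome_iff (xs := xs) (v := a)).mpr haX)
    obtain ⟨kb, hkb⟩ := Option.isSome_iff_exists.mp
      ((PySem.List.index?_isSome_iff (xs := xs) (v := b)).mpr hbX)
    rw [pvGetFirst xs a ka hka, pvGetFirst xs b kb hkb]
    rw [hka, hkb] at h
    simp at h ⊢
    exact_mod_cast h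

-- ===== VERDICT (by name: the statement is the Claim_ definition above) =====
theorem labelWord_spec : Claim_equal_labelWord := by
  intro lines _
  show labelWord lines = labelWord_alt lines
  unfold labelWord labelWord_alt
  have flat : lines.foldl
      (fun (st : PySem.Dict String Int × Int) line => line.foldl pvStep st)
      (PySem.Dict.empty, 0) = lines.flatten.foldl pvStep (PySem.Dict.empty, 0) := by
    rw [List.foldl_flatten]
  have e0 : (PySem.Dict.empty : PySem.Dict String Int) = pvD [] := by
    apply PySem.Dict.ext; rfl
  calc (lines.foldl
      (fun (st : PySem.Dict String Int × Int) line => line.foldl pvStep st)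
      (PySem.Dict.empty, 0)).1.items
      = (lines.flatten.foldl pvStep (pvD [], (([] : List String).length : Int))).1.items := by
        rw [flat, e0]; rfl
    _ = (pvD (lines.flatten.foldl PySem.Set.add [])).items := by rw [pvInv]
    _ = (PySem.List.enumerate (PySem.List.dedup lines.flatten)).map (fun p => (p.2, p.1)) := by
        rw [PySem.List.dedup_eq_ofList, PySem.Set.ofList_eq_foldl]
        rfl
    _ = (PySem.List.enumerate (PySem.List.sorted (pvFirst lines.flatten).keys
          (fun w => ((pvFirst lines.flatten).get? w).getD 0) false)).map (fun p => (p.2, p.1)) := by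
        rw [pvSorted_eq_dedup]
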